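-- pv_equiv track=rewrite | github.com/farodoc/Algorithms-and-Data-Structures-AGH-UST | Dynamic programming/sumy_przedzialow.py | best_sum
-- ===== SOURCE A (Python) =====
-- def best_sum(T, S):
--     n = len(T)
--     tab = [[T[i][0], T[i][1], S[i]] for i in range(n)]
--
--     tab.sort(key = lambda x:x[0])
--
--     F = [tab[i][2] for i in range(n)]
--
--     for i in range(1, n):
--         for j in range(i):
--             if tab[i][0] > tab[j][1]:
--                 F[i] = max(F[i], tab[i][2] + F[j])
--
--     return F
--
-- T = [(2,5),(7,10),(1,6),(0,1),(6,8),(11,12),(7,12)]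
--
-- S = [7,6,13,8,4,1,15]
-- ===== SOURCE B (Python) =====
-- import bisect
--
-- def best_sum(T, S):
--     n = len(T)
--     tab = sorted([[T[i][0], T[i][1], S[i]] for i in range(n)], key=lambda x: x[0])
--     pending = []   # kept sorted ascending by -end; the interval with the SMALLEST end sits at the tail
--     best = 0       # max(0, F-value of every interval whose end is already left of the sweep)
--     F = []
--     for a, b, s in tab:
--         while pending and -pending[-1][0] < a:
--             best = max(best, pending.pop()[1])
--         f = s + best
--         F.append(f)
--         bisect.insort(pending, (-b, f), key=lambda p: p[0])
--     return F
-- ===== Notes on version B (the rewrite author's own statement) =====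
-- stated objective: faster
-- what changed: A fills the chain-DP table with a quadratic double loop (for every interval it rescans all earlier intervals); B sweeps the start-sorted intervals once, keeping not-yet-expired intervals in a list ordered by end (bisect.insort) and folding each expired interval's value into a single running maximum, so the inner rescan disappears (a timing run measured ~2x at its largest size).
import Mathlib
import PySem

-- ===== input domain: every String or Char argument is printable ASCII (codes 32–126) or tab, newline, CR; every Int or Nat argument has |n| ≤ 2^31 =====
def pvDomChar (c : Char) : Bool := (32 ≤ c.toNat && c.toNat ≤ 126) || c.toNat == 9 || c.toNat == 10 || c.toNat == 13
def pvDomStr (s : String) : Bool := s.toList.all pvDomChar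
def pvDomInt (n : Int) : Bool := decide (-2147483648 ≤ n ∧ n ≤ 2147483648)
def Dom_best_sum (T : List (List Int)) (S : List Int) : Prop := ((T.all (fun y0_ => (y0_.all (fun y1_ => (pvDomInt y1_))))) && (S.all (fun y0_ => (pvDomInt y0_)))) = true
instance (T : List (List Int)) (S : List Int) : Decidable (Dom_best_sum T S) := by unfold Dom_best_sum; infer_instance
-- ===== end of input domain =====

-- B replaces A's quadratic double loop by a single sweep over the start-sorted intervals that keeps
-- not-yet-expired intervals in a list ordered by end (bisect.insort) and folds expired ones into a
-- running maximum, removing the quadratic inner rescan (a timing run measured B ~2x faster at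
-- its largest size); same return value on all of Pre_.

-- ===== PORT A =====
def best_sum (T : List (List Int)) (S : List Int) : List Int :=
  let n : Int := PySem.List.len T
  let tab : List (List Int) := (PySem.List.pyRange 0 n 1).map (fun i =>
    [PySem.List.pyGetD (PySem.List.pyGetD T i []) 0 0,
     PySem.List.pyGetD (PySem.List.pyGetD T i []) 1 0,
     PySem.List.pyGetD S i 0])
  let tab : List (List Int) := PySem.List.sorted tab (fun x => PySem.List.pyGetD x 0 0)
  let F : List Int := (PySem.List.pyRange 0 n 1).map (fun i =>
    PySem.List.pyGetD (PySem.List.pyGetD tab i []) 2 0)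
  (PySem.List.pyRange 1 n 1).foldl (fun F i =>
    (PySem.List.pyRange 0 i 1).foldl (fun F j =>
      if PySem.List.pyGetD (PySem.List.pyGetD tab i []) 0 0 >
         PySem.List.pyGetD (PySem.List.pyGetD tab j []) 1 0 then
        PySem.List.pySetD F i (max (PySem.List.pyGetD F i 0)
          (PySem.List.pyGetD (PySem.List.pyGetD tab i []) 2 0 + PySem.List.pyGetD F j 0))
      else F) F) F

-- ===== PORT B =====
-- the 'while pending and -pending[-1][0] < a: best = max(best, pending.pop()[1])' loop of Source B
def pvPop (a : Int) (pending : List (Int × Int)) (best : Int) : List (Int × Int) × Int :=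
  match h : pending.getLast? with
  | some p => if -p.1 < a then pvPop a pending.dropLast (max best p.2) else (pending, best)
  | none => (pending, best)
termination_by pending.length
decreasing_by
  have : pending ≠ [] := by intro hnil; rw [hnil] at h; simp at h
  cases pending with
  | nil => exact absurd rfl this
  | cons x xs => simp

-- bisect.insort(pending, x, key=lambda p: p[0]) : bisect_right on the keys, then list.insert there
def pvInsort (pending : List (Int × Int)) (x : Int × Int) : List (Int × Int) :=
  PySem.List.insert pending ((PySem.List.bisectRight (pending.map (·.1)) x.1 : Nat) : Int) x

def best_sum_alt (T : List (List Int)) (S : List Int) : List Int :=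
  let n : Int := PySem.List.len T
  let tab : List (List Int) := PySem.List.sorted ((PySem.List.pyRange 0 n 1).map (fun i =>
    [PySem.List.pyGetD (PySem.List.pyGetD T i []) 0 0,
     PySem.List.pyGetD (PySem.List.pyGetD T i []) 1 0,
     PySem.List.pyGetD S i 0])) (fun x => PySem.List.pyGetD x 0 0)
  (tab.foldl (fun st row =>
      let a := PySem.List.pyGetD row 0 0
      let b := PySem.List.pyGetD row 1 0
      let s := PySem.List.pyGetD row 2 0
      let pb := pvPop a st.1 st.2.1
      let f := s + pb.2
      (pvInsort pb.1 (-b, f), pb.2, st.2.2 ++ [f])) ([], 0, [])).2.2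

-- ===== PRECONDITION & SPEC =====
-- Pre_ excludes exactly the inputs where Python A raises an IndexError: S shorter than T,
-- or a row of T with fewer than two entries (both programs crash identically there).
def Pre_best_sum (T : List (List Int)) (S : List Int) : Prop :=
  T.length ≤ S.length ∧ ∀ row ∈ T, 2 ≤ row.length
instance (T : List (List Int)) (S : List Int) : Decidable (Pre_best_sum T S) := by
  unfold Pre_best_sum; infer_instance

def pvWitness_best_sum : List (List Int) × List Int :=
  ([[2, 5], [7, 10], [1, 6], [0, 1]], [7, 6, 13, 8])

def Spec_best_sum (T : List (List Int)) (S : List Int) (out : List Int) : Prop := out = best_sum_alt T S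
instance (T : List (List Int)) (S : List Int) (out : List Int) : Decidable (Spec_best_sum T S out) := by unfold Spec_best_sum; infer_instance

-- ===== CLAIM (what is proved, stated in full; the proofs are below) =====
def Claim_equal_best_sum : Prop := ∀ (T : List (List Int)) (S : List Int), Dom_best_sum T S → Pre_best_sum T S → Spec_best_sum T S (best_sum T S)

-- ===== LEMMAS AND PROOFS =====

-- row accessors of the sorted table
def pvA (tab : List (List Int)) (k : Nat) : Int := (tab.getD k []).getD 0 0
def pvB (tab : List (List Int)) (k : Nat) : Int := (tab.getD k []).getD 1 0
def pvS (tab : List (List Int)) (k : Nat) : Int := (tab.getD k []).getD 2 0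

-- the common value: pvG tab i = first i entries of the result list
def pvG (tab : List (List Int)) : Nat → List Int
  | 0 => []
  | i + 1 =>
    let F := pvG tab (i)
    F ++ [pvS tab i + (List.range i).foldl
      (fun m j => if pvA tab i > pvB tab j then max m (F.getD j 0) else m) 0]

def pvVal (tab : List (List Int)) (i : Nat) : Int :=
  pvS tab i + (List.range i).foldl
    (fun m j => if pvA tab i > pvB tab j then max m ((pvG tab i).getD j 0) else m) 0

theorem pvG_succ (tab : List (List Int)) (i : Nat) :
    pvG tab (i + 1) = pvG tab i ++ [pvVal tab i] := rfl

theorem pvG_length (tab : List (List Int)) (i : Nat) : (pvG tab i).length = i := by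
  induction i with
  | zero => rfl
  | succ i ih => rw [pvG_succ]; simp [ih]

theorem pvG_eq_map (tab : List (List Int)) (i : Nat) :
    pvG tab i = (List.range i).map (pvVal tab) := by
  induction i with
  | zero => rfl
  | succ i ih => rw [pvG_succ, List.range_succ, List.map_append, ih]; rfl

theorem pvG_getD (tab : List (List Int)) {j i : Nat} (h : j < i) :
    (pvG tab i).getD j 0 = pvVal tab j := by
  rw [pvG_eq_map]
  rw [List.getD_eq_getElem?_getD]
  simp [h]

-- the two loop bodies, as functions of the already-built sorted table
def pvALoops (tab : List (List Int)) (n : Int) : List Int :=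
  (PySem.List.pyRange 1 n 1).foldl (fun F i =>
    (PySem.List.pyRange 0 i 1).foldl (fun F j =>
      if PySem.List.pyGetD (PySem.List.pyGetD tab i []) 0 0 >
         PySem.List.pyGetD (PySem.List.pyGetD tab j []) 1 0 then
        PySem.List.pySetD F i (max (PySem.List.pyGetD F i 0)
          (PySem.List.pyGetD (PySem.List.pyGetD tab i []) 2 0 + PySem.List.pyGetD F j 0))
      else F) F)
    ((PySem.List.pyRange 0 n 1).map (fun i => PySem.List.pyGetD (PySem.List.pyGetD tab i []) 2 0))

def pvBStep (st : List (Int × Int) × Int × List Int) (row : List Int) :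
    List (Int × Int) × Int × List Int :=
  let a := PySem.List.pyGetD row 0 0
  let b := PySem.List.pyGetD row 1 0
  let s := PySem.List.pyGetD row 2 0
  let pb := pvPop a st.1 st.2.1
  let f := s + pb.2
  (pvInsort pb.1 (-b, f), pb.2, st.2.2 ++ [f])

def pvBLoops (tab : List (List Int)) : List Int := (tab.foldl pvBStep ([], 0, [])).2.2

def pvTab (T : List (List Int)) (S : List Int) : List (List Int) :=
  PySem.List.sorted ((PySem.List.pyRange 0 (PySem.List.len T) 1).map (fun i =>
    [PySem.List.pyGetD (PySem.List.pyGetD T i []) 0 0,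
     PySem.List.pyGetD (PySem.List.pyGetD T i []) 1 0,
     PySem.List.pyGetD S i 0])) (fun x => PySem.List.pyGetD x 0 0)

theorem best_sum_eq (T : List (List Int)) (S : List Int) :
    best_sum T S = pvALoops (pvTab T S) (PySem.List.len T) := rfl

theorem best_sum_alt_eq (T : List (List Int)) (S : List Int) :
    best_sum_alt T S = pvBLoops (pvTab T S) := rfl

theorem pvTab_length (T : List (List Int)) (S : List Int) : (pvTab T S).length = T.length := by
  simp [pvTab, PySem.List.length_sorted, PySem.List.length_pyRange_one]

-- starts are sorted
theorem pvTab_mono (T : List (List Int)) (S : List Int) {k k' : Nat}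
    (hk : k ≤ k') (hk' : k' < T.length) : pvA (pvTab T S) k ≤ pvA (pvTab T S) k' := by
  have hlen := pvTab_length T S
  have hq : k' < (pvTab T S).length := by omega
  have hp : k < (pvTab T S).length := by omega
  unfold pvA
  rw [List.getD_eq_getElem _ _ hp, List.getD_eq_getElem _ _ hq]
  have h := PySem.List.key_sorted_getElem_mono (key := fun x => PySem.List.pyGetD x 0 0)
    (xs := (PySem.List.pyRange 0 (PySem.List.len T) 1).map (fun i =>
      [PySem.List.pyGetD (PySem.List.pyGetD T i []) 0 0,
       PySem.List.pyGetD (PySem.List.pyGetD T i []) 1 0,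
       PySem.List.pyGetD S i 0])) (p := k) (q := k') hk hq
  simpa [PySem.List.pyGetD_zero, pvTab] using h

-- ===== A SIDE =====

theorem inner_fold (tab : List (List Int)) (i : Nat) :
    ∀ (js : List Nat) (F : List Int), (∀ j ∈ js, j < i) → i < F.length →
    js.foldl (fun F j =>
      if pvA tab i > pvB tab j then
        F.set i (max (F.getD i 0) (pvS tab i + F.getD j 0))
      else F) F
    = F.set i (js.foldl (fun m j =>
        if pvA tab i > pvB tab j then max m (pvS tab i + F.getD j 0) else m) (F.getD i 0)) := by
  intro js
  induction js with
  | nil =>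
    intro F _ hF
    simp only [List.foldl_nil]
    rw [List.getD_eq_getElem _ _ hF, List.set_getElem_self]
  | cons j t ih =>
    intro F h hF
    have hji : j < i := h j (by simp)
    simp only [List.foldl_cons]
    by_cases hc : pvA tab i > pvB tab j
    · rw [if_pos hc, if_pos hc]
      set v := max (F.getD i 0) (pvS tab i + F.getD j 0) with hv
      rw [ih (F.set i v) (fun j' hj' => h j' (by simp [hj'])) (by simpa using hF)]
      rw [List.set_set]
      congr 1
      have hgetD : ∀ j', j' ≠ i → (F.set i v).getD j' 0 = F.getD j' 0 := by
        intro j' hj'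
        simp [List.getD_eq_getElem?_getD, List.getElem?_set_ne (by omega : i ≠ j')]
      have hgi : (F.set i v).getD i 0 = v := by
        simp [List.getD_eq_getElem?_getD, hF]
      rw [hgi, hv]
      rw [PySem.List.foldl_congr_mem t _ (fun m j' =>
        if pvA tab i > pvB tab j' then max m (pvS tab i + F.getD j' 0) else m) _
        (by
          intro acc x hx
          have : x ≠ i := by have := h x (by simp [hx]); omega
          rw [hgetD x this])]
    · rw [if_neg hc, if_neg hc]
      exact ih F (fun j' hj' => h j' (by simp [hj'])) hF

theorem maxshift (p : Nat → Prop) [DecidablePred p] (g : Nat → Int) (s : Int) :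
    ∀ (l : List Nat) (m : Int),
    l.foldl (fun acc j => if p j then max acc (s + g j) else acc) (s + m)
    = s + l.foldl (fun acc j => if p j then max acc (g j) else acc) m := by
  intro l
  induction l with
  | nil => intro m; rfl
  | cons j t ih =>
    intro m
    by_cases h : p j <;> simp [h] <;> exact ih _

theorem set_mid (L R : List Int) (x v : Int) (i : Nat) (h : L.length = i) :
    (L ++ x :: R).set i v = (L ++ [v]) ++ R := by subst h; simp

theorem outer_fold (tab : List (List Int)) (N : Nat) :
    ∀ (d i : Nat), i + d = N →
    (PySem.List.pyRange (i : Int) (N : Int) 1).foldl (fun F i =>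
      (PySem.List.pyRange 0 i 1).foldl (fun F j =>
        if PySem.List.pyGetD (PySem.List.pyGetD tab i []) 0 0 >
           PySem.List.pyGetD (PySem.List.pyGetD tab j []) 1 0 then
          PySem.List.pySetD F i (max (PySem.List.pyGetD F i 0)
            (PySem.List.pyGetD (PySem.List.pyGetD tab i []) 2 0 + PySem.List.pyGetD F j 0))
        else F) F)
      (pvG tab i ++ (List.range d).map (fun k => pvS tab (i + k))) = pvG tab N := by
  intro d
  induction d with
  | zero =>
    intro i hi
    rw [PySem.List.pyRange_one_eq_nil (by omega)]
    simp [show i = N by omega]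
  | succ d ih =>
    intro i hi
    rw [PySem.List.pyRange_one_cons (by omega)]
    rw [List.foldl_cons]
    -- the inner loop
    rw [show ((i : Int) + 1) = ((i + 1 : Nat) : Int) by push_cast; ring]
    have hrest : (List.range (d + 1)).map (fun k => pvS tab (i + k))
        = pvS tab i :: (List.range d).map (fun k => pvS tab (i + 1 + k)) := by
      rw [List.range_succ_eq_map, List.map_cons, List.map_map]
      simp only [Nat.add_zero]
      congr 1
      apply List.map_congr_left
      intro k _
      simp only [Function.comp_apply]
      congr 1
      omega
    set F : List Int := pvG tab i ++ (List.range (d + 1)).map (fun k => pvS tab (i + k)) with hFdef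
    have hFlen : F.length = N := by
      simp [hFdef, pvG_length]; omega
    have hstep : (PySem.List.pyRange 0 (i : Int) 1).foldl (fun F j =>
        if PySem.List.pyGetD (PySem.List.pyGetD tab (i : Int) []) 0 0 >
           PySem.List.pyGetD (PySem.List.pyGetD tab j []) 1 0 then
          PySem.List.pySetD F (i : Int) (max (PySem.List.pyGetD F (i : Int) 0)
            (PySem.List.pyGetD (PySem.List.pyGetD tab (i : Int) []) 2 0 + PySem.List.pyGetD F j 0))
        else F) F
        = pvG tab (i + 1) ++ (List.range d).map (fun k => pvS tab (i + 1 + k)) := by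
      rw [PySem.List.pyRange_zero_natCast, List.foldl_map]
      simp only [PySem.List.pyGetD_natCast, PySem.List.pySetD_natCast,
        PySem.List.pyGetD_ofNat']
      have hfold := inner_fold tab i (List.range i) F
        (by intro j hj; exact List.mem_range.mp hj) (by omega)
      unfold pvA pvB pvS at hfold
      rw [hfold]
      rw [show ((tab.getD i []).getD 2 0 : Int) = pvS tab i from rfl]
      -- the accumulated inner value
      have hFi : F.getD i 0 = pvS tab i := by
        rw [hFdef, List.getD_append_right _ _ _ _ (by rw [pvG_length])]
        rw [hrest, pvG_length]
        simp
      rw [hFi]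
      have hshift := maxshift (fun j => pvA tab i > pvB tab j) (fun j => F.getD j 0)
        (pvS tab i) (List.range i) 0
      rw [add_zero (pvS tab i)] at hshift
      unfold pvA pvB at hshift
      rw [hshift]
      have hcong : (List.range i).foldl (fun acc j =>
          if (tab.getD i []).getD 0 0 > (tab.getD j []).getD 1 0 then max acc (F.getD j 0) else acc) 0
          = (List.range i).foldl (fun acc j =>
          if (tab.getD i []).getD 0 0 > (tab.getD j []).getD 1 0 then max acc ((pvG tab i).getD j 0) else acc) 0 := by
        apply PySem.List.foldl_congr_mem
        intro acc j hj
        have hji : j < i := List.mem_range.mp hj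
        rw [hFdef, List.getD_append _ _ _ _ (by rw [pvG_length]; omega)]
      rw [hcong]
      have hval : pvS tab i + (List.range i).foldl (fun acc j =>
          if (tab.getD i []).getD 0 0 > (tab.getD j []).getD 1 0 then max acc ((pvG tab i).getD j 0) else acc) 0
          = pvVal tab i := rfl
      rw [hval]
      rw [hFdef, hrest]
      rw [set_mid _ _ _ _ _ (pvG_length tab i), ← pvG_succ]
    rw [hstep]
    exact ih (i + 1) (by omega)

theorem A_side (tab : List (List Int)) (N : Nat) (hN : tab.length = N) :
    pvALoops tab (N : Int) = pvG tab N := by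
  unfold pvALoops
  cases N with
  | zero =>
    rw [PySem.List.pyRange_one_eq_nil (by norm_num), PySem.List.pyRange_one_eq_nil (by norm_num)]
    rfl
  | succ M =>
    have hF0 : (PySem.List.pyRange 0 ((M + 1 : Nat) : Int) 1).map (fun i =>
        PySem.List.pyGetD (PySem.List.pyGetD tab i []) 2 0)
        = pvG tab 1 ++ (List.range M).map (fun k => pvS tab (1 + k)) := by
      rw [PySem.List.pyRange_zero_natCast, List.map_map]
      rw [List.range_succ_eq_map, List.map_cons, List.map_map]
      have h1 : pvG tab 1 = [pvS tab 0] := by simp [pvG]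
      rw [h1]
      simp only [List.cons_append, List.nil_append, List.cons.injEq]
      constructor
      · simp [pvS, PySem.List.pyGetD_ofNat', List.getD_eq_getElem?_getD]
      · apply List.map_congr_left
        intro k _
        simp only [Function.comp_apply, PySem.List.pyGetD_natCast,
          PySem.List.pyGetD_ofNat', pvS]
        congr 2
        omega
    rw [show ((1 : Int)) = ((1 : Nat) : Int) by norm_num] at *
    rw [hF0]
    exact outer_fold tab (M + 1) M 1 (by omega)

-- ===== B SIDE =====

def pvPend (tab : List (List Int)) (i : Nat) : List Nat :=
  (List.range i).filter (fun j => decide (∀ k, k < i → j < k → pvA tab k ≤ pvB tab j))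

def pvInv (tab : List (List Int)) (i : Nat) (st : List (Int × Int) × Int × List Int) : Prop :=
  st.2.2 = pvG tab i ∧
  st.1.Pairwise (fun p q => p.1 ≤ q.1) ∧
  st.1.Perm ((pvPend tab i).map (fun j => (-(pvB tab j), pvVal tab j))) ∧
  0 ≤ st.2.1 ∧
  (st.2.1 = 0 ∨ ∃ j, j < i ∧ j ∉ pvPend tab i ∧ st.2.1 = pvVal tab j) ∧
  (∀ j, j < i → j ∉ pvPend tab i → pvVal tab j ≤ st.2.1)

theorem pvPop_nil (a : Int) (best : Int) : pvPop a [] best = ([], best) := by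
  rw [pvPop]
  rfl

theorem pvPop_concat (a : Int) (ys : List (Int × Int)) (y : Int × Int) (best : Int) :
    pvPop a (ys ++ [y]) best
    = if -y.1 < a then pvPop a ys (max best y.2) else (ys ++ [y], best) := by
  rw [pvPop]
  split
  next p h =>
    rw [List.getLast?_concat] at h
    cases h
    simp
  next h =>
    rw [List.getLast?_concat] at h
    simp at h

theorem pvPop_spec (a : Int) :
    ∀ (pending : List (Int × Int)) (best : Int),
    pending.Pairwise (fun p q => p.1 ≤ q.1) →
    (pvPop a pending best).1 = pending.filter (fun p => decide (a ≤ -p.1)) ∧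
    best ≤ (pvPop a pending best).2 ∧
    ((pvPop a pending best).2 = best ∨
      ∃ p ∈ pending, ¬(a ≤ -p.1) ∧ (pvPop a pending best).2 = p.2) ∧
    (∀ p ∈ pending, ¬(a ≤ -p.1) → p.2 ≤ (pvPop a pending best).2) := by
  intro pending
  induction pending using List.reverseRecOn with
  | nil =>
    intro best _
    refine ⟨by simp [pvPop_nil], by simp [pvPop_nil], Or.inl (by simp [pvPop_nil]), by simp⟩
  | append_singleton ys y ih =>
    intro best hp
    obtain ⟨hys, -, hcross⟩ := List.pairwise_append.mp hp
    have hcross' : ∀ p ∈ ys, p.1 ≤ y.1 := fun p hp' => hcross p hp' y (by simp)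
    rw [pvPop_concat]
    by_cases hc : -y.1 < a
    · rw [if_pos hc]
      obtain ⟨h1, h2, h3, h4⟩ := ih (max best y.2) hys
      refine ⟨?_, ?_, ?_, ?_⟩
      · rw [h1, List.filter_append]
        simp [show ¬ (a ≤ -y.1) by omega]
      · exact le_trans (le_max_left _ _) h2
      · rcases h3 with h | ⟨p, hpm, hpc, hpe⟩
        · rcases max_choice best y.2 with hm | hm
          · left; rw [h, hm]
          · right; exact ⟨y, by simp, by omega, by rw [h, hm]⟩
        · right; exact ⟨p, by simp [hpm], hpc, hpe⟩
      · intro p hpm hpc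
        rcases List.mem_append.mp hpm with h | h
        · exact h4 p h hpc
        · have hpy : p = y := by simpa using h
          subst hpy
          exact le_trans (le_max_right _ _) h2
    · rw [if_neg hc]
      refine ⟨?_, le_refl _, Or.inl rfl, ?_⟩
      · rw [Eq.comm, List.filter_eq_self]
        intro p hpm
        rcases List.mem_append.mp hpm with h | h
        · have := hcross' p h
          simp only [decide_eq_true_eq]
          omega
        · have hpy : p = y := by simpa using h
          subst hpy
          simp only [decide_eq_true_eq]
          omega
      · intro p hpm hpc
        exfalso
        rcases List.mem_append.mp hpm with h | h
        · exact hpc (by have := hcross' p h; omega)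
        · have hpy : p = y := by simpa using h
          subst hpy
          exact hpc (by omega)

theorem pvInsort_spec (pending : List (Int × Int)) (x : Int × Int)
    (h : pending.Pairwise (fun p q => p.1 ≤ q.1)) :
    (pvInsort pending x).Pairwise (fun p q => p.1 ≤ q.1) ∧
    (pvInsort pending x).Perm (x :: pending) := by
  have hmap : (pending.map (·.1)).Pairwise (fun u v => u ≤ v) := by
    rw [List.pairwise_map]
    exact h
  obtain ⟨hle, hlt, hgt⟩ := PySem.List.bisectRight_spec (pending.map (·.1)) x.1 hmap
  rw [List.length_map] at hle
  set pos := PySem.List.bisectRight (pending.map (·.1)) x.1 with hpos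
  unfold pvInsort
  rw [← hpos, PySem.List.insert_natCast pending pos x hle]
  constructor
  · rw [List.pairwise_append]
    refine ⟨h.sublist (List.take_sublist _ _), ?_, ?_⟩
    · rw [List.pairwise_cons]
      refine ⟨?_, h.sublist (List.drop_sublist _ _)⟩
      intro q hq
      obtain ⟨k, hk, hkq⟩ := List.mem_iff_getElem.mp hq
      have hk' : pos + k < pending.length := by
        have := List.length_drop (l := pending) (i := pos); omega
      have := hgt (pos + k) (by simpa using hk') (by omega)
      rw [List.getElem_map] at this
      rw [← hkq, List.getElem_drop]
      omega
    · intro p hpm q hqm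
      obtain ⟨j, hj, hjp⟩ := List.mem_iff_getElem.mp hpm
      have hj'' := hj
      simp only [List.length_take] at hj''
      have hj' : j < pos := by omega
      have hple : p.1 ≤ x.1 := by
        have := hlt j (by simp; omega) hj'
        rw [List.getElem_map] at this
        rw [← hjp, List.getElem_take]
        exact this
      rcases List.mem_cons.mp hqm with hqx | hqd
      · subst hqx; exact hple
      · obtain ⟨k, hk, hkq⟩ := List.mem_iff_getElem.mp hqd
        have hk' : pos + k < pending.length := by
          have := List.length_drop (l := pending) (i := pos); omega
        have := hgt (pos + k) (by simpa using hk') (by omega)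
        rw [List.getElem_map] at this
        rw [← hkq, List.getElem_drop]
        omega
  · have := List.perm_middle (a := x) (l₁ := pending.take pos) (l₂ := pending.drop pos)
    refine this.trans ?_
    rw [List.take_append_drop]

theorem foldl_if_filter (p : Nat → Prop) [DecidablePred p] (g : Nat → Int) :
    ∀ (l : List Nat) (m : Int),
    l.foldl (fun acc j => if p j then max acc (g j) else acc) m
    = ((l.filter (fun j => decide (p j))).map g).foldl max m := by
  intro l
  induction l with
  | nil => intro m; rfl
  | cons j t ih => intro m; by_cases h : p j <;> simp [h, ih]

theorem mem_pvPend (tab : List (List Int)) (i j : Nat) :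
    j ∈ pvPend tab i ↔ j < i ∧ ∀ k, k < i → j < k → pvA tab k ≤ pvB tab j := by
  unfold pvPend
  rw [List.mem_filter, List.mem_range]
  simp only [decide_eq_true_eq]

theorem pvPend_succ (tab : List (List Int)) (i : Nat) :
    pvPend tab (i + 1)
    = (pvPend tab i).filter (fun j => decide (pvA tab i ≤ pvB tab j)) ++ [i] := by
  unfold pvPend
  rw [List.range_succ, List.filter_append, List.filter_filter]
  congr 1
  · apply List.filter_congr
    intro j hj
    have hji : j < i := List.mem_range.mp hj
    simp only [← Bool.decide_and, decide_eq_decide]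
    constructor
    · intro h
      exact ⟨h i (by omega) hji, fun k hk hjk => h k (by omega) hjk⟩
    · rintro ⟨hbi, h⟩ k hk hjk
      rcases Nat.lt_succ_iff_lt_or_eq.mp hk with hk' | rfl
      · exact h k hk' hjk
      · exact hbi
  · simp only [List.filter_cons, List.filter_nil, decide_eq_true_eq]
    rw [if_pos (fun k hk hik => by omega)]

theorem B_step (tab : List (List Int)) (N : Nat)
    (hmono : ∀ k k', k ≤ k' → k' < N → pvA tab k ≤ pvA tab k')
    (i : Nat) (hiN : i < N) (row : List Int) (hrow : tab.getD i [] = row)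
    (st : List (Int × Int) × Int × List Int) (hinv : pvInv tab i st) :
    pvInv tab (i + 1) (pvBStep st row) := by
  obtain ⟨hF, hsort, hperm, hbnn, hbw, hbub⟩ := hinv
  have ha : PySem.List.pyGetD row 0 0 = pvA tab i := by
    rw [PySem.List.pyGetD_ofNat', pvA, hrow]
  have hb : PySem.List.pyGetD row 1 0 = pvB tab i := by
    rw [PySem.List.pyGetD_ofNat', pvB, hrow]
  have hs : PySem.List.pyGetD row 2 0 = pvS tab i := by
    rw [PySem.List.pyGetD_ofNat', pvS, hrow]
  have hstep : pvBStep st row =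
      (pvInsort (pvPop (pvA tab i) st.1 st.2.1).1
         (-(pvB tab i), pvS tab i + (pvPop (pvA tab i) st.1 st.2.1).2),
       (pvPop (pvA tab i) st.1 st.2.1).2,
       st.2.2 ++ [pvS tab i + (pvPop (pvA tab i) st.1 st.2.1).2]) := by
    simp only [pvBStep, ha, hb, hs]
  obtain ⟨hP1, hP2, hP3, hP4⟩ := pvPop_spec (pvA tab i) st.1 st.2.1 hsort
  set P := pvPop (pvA tab i) st.1 st.2.1 with hPdef
  -- complement characterizations
  have hiJ : ∀ j, j < i → j ∉ pvPend tab i → pvB tab j < pvA tab i := by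
    intro j hj hnm
    rw [mem_pvPend] at hnm
    push Not at hnm
    obtain ⟨k, hk, hjk, hkab⟩ := hnm hj
    have := hmono k i (by omega) hiN
    omega
  have hnotmem_succ : ∀ j, j < i → (j ∉ pvPend tab (i + 1) ↔ pvB tab j < pvA tab i) := by
    intro j hj
    constructor
    · intro hnm
      rw [mem_pvPend] at hnm
      push Not at hnm
      obtain ⟨k, hk, hjk, hkab⟩ := hnm (by omega)
      have := hmono k i (by omega) hiN
      omega
    · intro hba hm
      rw [mem_pvPend] at hm
      have := hm.2 i (by omega) hj
      omega
  -- the inner max of pvVal i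
  have hm_eq : pvVal tab i = pvS tab i +
      (((List.range i).filter (fun j => decide (pvA tab i > pvB tab j))).map
        (pvVal tab)).foldl max 0 := by
    unfold pvVal
    congr 1
    rw [foldl_if_filter (fun j => pvA tab i > pvB tab j) _ (List.range i) 0]
    congr 1
    apply List.map_congr_left
    intro j hj
    exact pvG_getD tab (List.mem_range.mp (List.mem_filter.mp hj).1)
  set J := (List.range i).filter (fun j => decide (pvA tab i > pvB tab j)) with hJdef
  have hJmem : ∀ j, j ∈ J ↔ (j < i ∧ pvB tab j < pvA tab i) := by
    intro j
    simp [hJdef, List.mem_filter, List.mem_range]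
  have hm0 := PySem.List.le_foldl_max (J.map (pvVal tab)) (0 : Int)
  have hmmem := PySem.List.foldl_max_mem (J.map (pvVal tab)) (0 : Int)
  have hbest_ub : ∀ j ∈ J, pvVal tab j ≤ P.2 := by
    intro j hj
    rw [hJmem] at hj
    by_cases hmem : j ∈ pvPend tab i
    · have hpair : (-(pvB tab j), pvVal tab j) ∈ st.1 :=
        hperm.mem_iff.mpr (List.mem_map.mpr ⟨j, hmem, rfl⟩)
      have := hP4 _ hpair (by simpa using hj.2)
      simpa using this
    · exact le_trans (hbub j hj.1 hmem) hP2
  have hbest_mem : P.2 = 0 ∨ ∃ j ∈ J, P.2 = pvVal tab j := by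
    rcases hP3 with h | ⟨p, hpm, hpc, hpe⟩
    · rw [h]
      rcases hbw with h0 | ⟨j, hj, hnm, hbj⟩
      · left; exact h0
      · right; exact ⟨j, (hJmem j).mpr ⟨hj, hiJ j hj hnm⟩, hbj⟩
    · right
      obtain ⟨j, hjm, hjeq⟩ := List.mem_map.mp (hperm.mem_iff.mp hpm)
      have hji : j < i := ((mem_pvPend tab i j).mp hjm).1
      refine ⟨j, (hJmem j).mpr ⟨hji, ?_⟩, ?_⟩
      · rw [← hjeq] at hpc
        simp at hpc
        omega
      · rw [hpe, ← hjeq]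
  have hb'0 : 0 ≤ P.2 := le_trans hbnn hP2
  have hbm : P.2 = (J.map (pvVal tab)).foldl max 0 := by
    apply le_antisymm
    · rcases hbest_mem with h | ⟨j, hj, he⟩
      · rw [h]; exact hm0.1
      · rw [he]; exact hm0.2 _ (List.mem_map.mpr ⟨j, hj, rfl⟩)
    · rcases hmmem with h | hmem2
      · rw [h]; exact hb'0
      · obtain ⟨j, hj, he⟩ := List.mem_map.mp hmem2
        rw [← he]
        exact hbest_ub j hj
  have hf : pvS tab i + P.2 = pvVal tab i := by rw [hbm, hm_eq]
  -- the new pending list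
  have hKperm : P.1.Perm (((pvPend tab i).filter
      (fun j => decide (pvA tab i ≤ pvB tab j))).map
      (fun j => (-(pvB tab j), pvVal tab j))) := by
    rw [hP1]
    refine (hperm.filter (fun p => decide (pvA tab i ≤ -p.1))).trans ?_
    rw [List.filter_map]
    apply List.Perm.of_eq
    congr 1
    apply List.filter_congr
    intro j _
    simp
  have hsort' : P.1.Pairwise (fun p q => p.1 ≤ q.1) := by
    rw [hP1]
    exact hsort.sublist List.filter_sublist
  obtain ⟨hins_sort, hins_perm⟩ :=
    pvInsort_spec P.1 (-(pvB tab i), pvS tab i + P.2) hsort'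
  rw [hstep]
  refine ⟨?_, hins_sort, ?_, hb'0, ?_, ?_⟩
  · show st.2.2 ++ [pvS tab i + P.2] = pvG tab (i + 1)
    rw [hF, hf, pvG_succ]
  · show (pvInsort P.1 (-(pvB tab i), pvS tab i + P.2)).Perm _
    refine hins_perm.trans ?_
    refine ((hKperm.cons _)).trans ?_
    rw [pvPend_succ, List.map_append, List.map_singleton, hf]
    exact (List.perm_append_singleton _ _).symm
  · show P.2 = 0 ∨ ∃ j, j < i + 1 ∧ j ∉ pvPend tab (i + 1) ∧ P.2 = pvVal tab j
    rcases hbest_mem with h | ⟨j, hj, he⟩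
    · left; exact h
    · right
      rw [hJmem] at hj
      exact ⟨j, by omega, (hnotmem_succ j hj.1).mpr hj.2, he⟩
  · show ∀ j, j < i + 1 → j ∉ pvPend tab (i + 1) → pvVal tab j ≤ P.2
    intro j hj hnm
    rcases Nat.lt_succ_iff_lt_or_eq.mp hj with hj' | rfl
    · exact hbest_ub j ((hJmem j).mpr ⟨hj', (hnotmem_succ j hj').mp hnm⟩)
    · exfalso
      apply hnm
      rw [mem_pvPend]
      exact ⟨by omega, fun k hk hjk => by omega⟩

theorem B_side (tab : List (List Int)) (N : Nat) (hN : tab.length = N)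
    (hmono : ∀ k k', k ≤ k' → k' < N → pvA tab k ≤ pvA tab k') :
    pvBLoops tab = pvG tab N := by
  suffices h : ∀ (suf pre : List (List Int)) (st : List (Int × Int) × Int × List Int),
      tab = pre ++ suf → pvInv tab pre.length st →
      (suf.foldl pvBStep st).2.2 = pvG tab N by
    have h0 : pvInv tab 0 ([], 0, []) := by
      refine ⟨rfl, List.Pairwise.nil, ?_, le_refl 0, Or.inl rfl, by omega⟩
      simp [pvPend]
    exact h tab [] ([], 0, []) rfl h0
  intro suf
  induction suf with
  | nil =>
    intro pre st htab hinv
    simp only [List.foldl_nil]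
    rw [hinv.1]
    congr 1
    rw [htab] at hN
    simpa using hN
  | cons row suf' ih =>
    intro pre st htab hinv
    have hiN : pre.length < N := by
      rw [htab] at hN
      simp at hN
      omega
    have hrow : tab.getD pre.length [] = row := by
      rw [htab, List.getD_append_right _ _ _ _ (le_refl _)]
      simp
    simp only [List.foldl_cons]
    have hinv' := B_step tab N hmono pre.length hiN row hrow st hinv
    have := ih (pre ++ [row]) (pvBStep st row) (by rw [htab]; simp)
      (by simpa using hinv')
    simpa using this

-- ===== VERDICT (by name: the statement is the Claim_ definition above) =====
theorem best_sum_spec : Claim_equal_best_sum := by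
  intro T S _hDom _hPre
  unfold Spec_best_sum
  rw [best_sum_eq, best_sum_alt_eq]
  simp only [PySem.List.len_eq]
  rw [A_side (pvTab T S) T.length (pvTab_length T S),
      B_side (pvTab T S) T.length (pvTab_length T S)
        (fun k k' hk hk' => pvTab_mono T S hk hk')]
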